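-- pv_equiv track=rewrite | github.com/Kobrasadetin/code2clip | file_list_widget.py | _convert_wsl_unc_to_drive
-- ===== SOURCE A (Python) =====
-- def _convert_wsl_unc_to_drive(filepath: str) -> str:
--     simplified = filepath.replace("\\\\", "\\")
--     lowered = simplified.lower()
--     prefix = "\\wsl.localhost\\"
--     if not lowered.startswith(prefix):
--         return filepath
--     parts = [segment for segment in simplified.split("\\") if segment]
--     if len(parts) < 4:
--         return filepath
--     if parts[0].lower() != "wsl.localhost":
--         return filepath
--     if parts[2].lower() != "mnt":
--         return filepath
--     drive = parts[3]
--     if len(drive) != 1 or not drive.isalpha():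
--         return filepath
--     remainder = "\\".join(parts[4:])
--     if remainder:
--         return f"{drive.upper()}:\\{remainder}"
--     return f"{drive.upper()}:\\"
-- ===== SOURCE B (Python) =====
-- def _convert_wsl_unc_to_drive(filepath: str) -> str:
--     # Sequential segment consumption instead of split-into-list + positional indexing.
--     simplified = filepath.replace("\\\\", "\\")
--     if not simplified.lower().startswith("\\wsl.localhost\\"):
--         return filepath
--
--     def next_seg(s):
--         while s and s[0] == "\\":
--             s = s[1:]
--         j = 0
--         while j < len(s) and s[j] != "\\":
--             j += 1
--         return s[:j], s[j:]
--
--     host, rest = next_seg(simplified)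
--     if host.lower() != "wsl.localhost":
--         return filepath
--     _distro, rest = next_seg(rest)
--     mnt, rest = next_seg(rest)
--     if mnt.lower() != "mnt":
--         return filepath
--     drive, rest = next_seg(rest)
--     if len(drive) != 1 or not drive.isalpha():
--         return filepath
--     remainder = "\\".join(s for s in rest.split("\\") if s)
--     return f"{drive.upper()}:\\{remainder}"
-- ===== Notes on version B (the rewrite author's own statement) =====
-- stated objective: alternative
-- what changed: Instead of splitting the whole path into a list of nonempty segments and checking them by position, B walks the string with a sequential cursor that consumes one backslash-separated segment at a time (host, distro, mnt, drive) and validates each as it appears, renormalizing only the remaining tail.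
import Mathlib
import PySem

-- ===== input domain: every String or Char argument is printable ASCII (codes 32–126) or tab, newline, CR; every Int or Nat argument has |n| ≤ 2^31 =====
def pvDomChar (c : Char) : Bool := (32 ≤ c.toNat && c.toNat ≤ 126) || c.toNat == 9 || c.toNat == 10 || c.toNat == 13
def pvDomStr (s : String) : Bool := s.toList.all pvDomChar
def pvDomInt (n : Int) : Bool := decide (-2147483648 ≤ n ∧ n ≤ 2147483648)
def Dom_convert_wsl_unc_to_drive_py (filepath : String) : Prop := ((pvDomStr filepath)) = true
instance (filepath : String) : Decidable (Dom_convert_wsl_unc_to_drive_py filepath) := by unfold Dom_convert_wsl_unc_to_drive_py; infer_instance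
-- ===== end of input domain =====

-- B re-implements A by sequential segment consumption (a cursor eating one backslash-separated
-- segment at a time) instead of A's full split-into-list plus positional indexing; objective:
-- alternative structure, same cost.

-- ===== PORT A =====
def convert_wsl_unc_to_drive_py (filepath : String) : String :=
  let simplified := PySem.Str.replace filepath "\\\\" "\\"
  let lowered := PySem.Str.lower simplified
  let pfx := "\\wsl.localhost\\"
  if ¬ (PySem.Str.startswith lowered pfx) then filepath
  else
    let parts := ((PySem.Str.split? simplified "\\").getD []).filter (fun seg => seg ≠ "")
    if parts.length < 4 then filepath
    else if PySem.Str.lower (PySem.List.pyGetD parts 0 "") ≠ "wsl.localhost" then filepath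
    else if PySem.Str.lower (PySem.List.pyGetD parts 2 "") ≠ "mnt" then filepath
    else
      let drive := PySem.List.pyGetD parts 3 ""
      if PySem.Str.len drive ≠ 1 ∨ ¬ PySem.Str.strIsalpha drive then filepath
      else
        let remainder := PySem.Str.join "\\" (PySem.List.slice parts (some 4) none)
        if remainder ≠ "" then PySem.Str.upper drive ++ ":\\" ++ remainder
        else PySem.Str.upper drive ++ ":\\"

-- ===== PORT B =====
-- B's next_seg works on the remaining string; here the remainder is kept as List Char
-- (the cursor state) and turned back into a String for the final split, exactly as Source B
-- slices the remaining string.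
def pvSkipBS : List Char → List Char
  | [] => []
  | c :: cs => if c = '\\' then pvSkipBS cs else c :: cs

def pvTakeSeg : List Char → List Char
  | [] => []
  | c :: cs => if c = '\\' then [] else c :: pvTakeSeg cs

def pvDropSeg : List Char → List Char
  | [] => []
  | c :: cs => if c = '\\' then c :: cs else pvDropSeg cs

def pvNextSeg (l : List Char) : String × List Char :=
  (String.ofList (pvTakeSeg (pvSkipBS l)), pvDropSeg (pvSkipBS l))

def convert_wsl_unc_to_drive_py_alt (filepath : String) : String :=
  let simplified := PySem.Str.replace filepath "\\\\" "\\"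
  if ¬ (PySem.Str.startswith (PySem.Str.lower simplified) "\\wsl.localhost\\") then filepath
  else
    let s0 := pvNextSeg simplified.toList
    if PySem.Str.lower s0.1 ≠ "wsl.localhost" then filepath
    else
      let s1 := pvNextSeg s0.2
      let s2 := pvNextSeg s1.2
      if PySem.Str.lower s2.1 ≠ "mnt" then filepath
      else
        let s3 := pvNextSeg s2.2
        if PySem.Str.len s3.1 ≠ 1 ∨ ¬ PySem.Str.strIsalpha s3.1 then filepath
        else
          let remainder := PySem.Str.join "\\"
            (((PySem.Str.split? (String.ofList s3.2) "\\").getD []).filter (fun seg => seg ≠ ""))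
          PySem.Str.upper s3.1 ++ ":\\" ++ remainder

-- ===== PRECONDITION & SPEC =====
def Spec_convert_wsl_unc_to_drive_py (filepath : String) (out : String) : Prop := out = convert_wsl_unc_to_drive_py_alt filepath
instance (filepath : String) (out : String) : Decidable (Spec_convert_wsl_unc_to_drive_py filepath out) := by unfold Spec_convert_wsl_unc_to_drive_py; infer_instance

-- ===== CLAIM (what is proved, stated in full; the proofs are below) =====
def Claim_equal_convert_wsl_unc_to_drive_py : Prop := ∀ (filepath : String), Dom_convert_wsl_unc_to_drive_py filepath → Spec_convert_wsl_unc_to_drive_py filepath (convert_wsl_unc_to_drive_py filepath)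

-- ===== LEMMAS AND PROOFS =====

lemma pvDropSeg_length_le (l : List Char) : (pvDropSeg l).length ≤ l.length := by
  induction l with
  | nil => simp [pvDropSeg]
  | cons c cs ih =>
    simp only [pvDropSeg]
    split
    · simp
    · exact Nat.le_succ_of_le ih

lemma pvDropSeg_shape (l : List Char) : pvDropSeg l = [] ∨ ∃ r, pvDropSeg l = '\\' :: r := by
  induction l with
  | nil => simp [pvDropSeg]
  | cons c cs ih =>
    simp only [pvDropSeg]
    split
    · right; exact ⟨cs, by simp_all⟩
    · exact ih

-- the list of nonempty segments, the proofs' common currency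
def pvSegs : List Char → List (List Char)
  | [] => []
  | c :: cs =>
    if c = '\\' then pvSegs cs
    else (c :: pvTakeSeg cs) :: pvSegs (pvDropSeg cs)
termination_by l => l.length
decreasing_by
  all_goals simp only [List.length_cons]
  · omega
  · exact Nat.lt_succ_of_le (pvDropSeg_length_le cs)

-- Python str.split('\') as a plain structural recursion
def pvSplit1 : List Char → List (List Char)
  | [] => [[]]
  | c :: cs =>
    if c = '\\' then [] :: pvSplit1 cs
    else match pvSplit1 cs with
      | [] => [[c]]
      | h :: t => (c :: h) :: t

lemma pvSplit1_ne_nil (l : List Char) : pvSplit1 l ≠ [] := by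
  cases l with
  | nil => simp [pvSplit1]
  | cons c cs =>
    simp only [pvSplit1]
    split
    · simp
    · split <;> simp

lemma pvSplit1_head_tail (l : List Char) :
    pvSplit1 l = pvTakeSeg l :: (match pvDropSeg l with
      | [] => []
      | _ :: r => pvSplit1 r) := by
  induction l with
  | nil => simp [pvSplit1, pvTakeSeg, pvDropSeg]
  | cons c cs ih =>
    by_cases hc : c = '\\'
    · simp [pvSplit1, pvTakeSeg, pvDropSeg, hc]
    · simp only [pvSplit1, pvTakeSeg, pvDropSeg, if_neg hc]
      rw [ih]

lemma go_eq (fuel : Nat) :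
    ∀ (l cur : List Char) (accs : List (List Char)), l.length < fuel →
    PySem.Chars.splitOn.go ['\\'] fuel l cur accs =
      accs.reverse ++ (match pvSplit1 l with
        | [] => [cur.reverse]
        | h :: t => (cur.reverse ++ h) :: t) := by
  induction fuel with
  | zero => intro l cur accs h; omega
  | succ n ih =>
    intro l cur accs h
    cases l with
    | nil =>
      rw [PySem.Chars.splitOn.go] <;> simp [pvSplit1]
    | cons c cs =>
      rw [PySem.Chars.splitOn.go]
      simp only [List.length_cons] at h
      by_cases hc : c = '\\'
      · subst hc
        have hpre : List.isPrefixOf ['\\'] ('\\' :: cs) = true := by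
          simp [List.isPrefixOf]
        rw [if_pos hpre]
        have hdr : List.drop (['\\'] : List Char).length ('\\' :: cs) = cs := rfl
        rw [hdr, ih cs [] (cur.reverse :: accs) (by omega)]
        simp only [pvSplit1]
        rcases hsp : pvSplit1 cs with _ | ⟨h1, t1⟩
        · exact absurd hsp (pvSplit1_ne_nil cs)
        · simp
      · have hpre : List.isPrefixOf ['\\'] (c :: cs) = false := by
          simp [List.isPrefixOf]
          exact fun h => hc h.symm
        rw [if_neg (by rw [hpre]; simp)]
        rw [ih cs (c :: cur) accs (by omega)]
        simp only [pvSplit1, if_neg hc]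
        rcases hsp : pvSplit1 cs with _ | ⟨h1, t1⟩
        · simp
        · simp

lemma splitOn_eq_pvSplit1 (l : List Char) :
    PySem.Chars.splitOn l ['\\'] = pvSplit1 l := by
  rw [PySem.Chars.splitOn, go_eq (l.length + 1) l [] [] (by omega)]
  rcases hsp : pvSplit1 l with _ | ⟨h1, t1⟩
  · exact absurd hsp (pvSplit1_ne_nil l)
  · simp

lemma filter_pvSplit1 (l : List Char) :
    (pvSplit1 l).filter (fun s => s ≠ []) = pvSegs l := by
  induction l using pvSegs.induct with
  | case1 => simp [pvSplit1, pvSegs]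
  | case2 cs ih =>
    simp only [pvSplit1, pvSegs]
    simpa using ih
  | case3 c cs hc ih =>
    rw [pvSplit1_head_tail]
    have ht : pvTakeSeg (c :: cs) = c :: pvTakeSeg cs := by simp [pvTakeSeg, hc]
    have hdrop : pvDropSeg (c :: cs) = pvDropSeg cs := by simp [pvDropSeg, hc]
    rw [ht, hdrop]
    rcases pvDropSeg_shape cs with h0 | ⟨r, hr⟩
    · simp [h0, pvSegs, hc]
    · rw [hr] at ih ⊢
      simp only [pvSplit1] at ih
      simp at ih
      simp [pvSegs, hc, hr, ih]

lemma parts_eq (s : String) :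
    ((PySem.Str.split? s "\\").getD []).filter (fun seg => seg ≠ "") =
      (pvSegs s.toList).map String.ofList := by
  have hsep : ("\\" : String).toList = ['\\'] := by decide
  simp only [PySem.Str.split?, PySem.Chars.split?, hsep]
  simp only [List.isEmpty_cons, Bool.false_eq_true, if_false, Option.map_some, Option.getD_some]
  rw [splitOn_eq_pvSplit1, List.filter_map]
  rw [List.filter_congr (q := fun x => decide (x ≠ [])) ?_, filter_pvSplit1]
  intro x _
  simp [Function.comp]

lemma takeSeg_skip (l : List Char) : pvTakeSeg (pvSkipBS l) = (pvSegs l).headD [] := by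
  induction l with
  | nil => simp [pvSkipBS, pvTakeSeg, pvSegs]
  | cons c cs ih =>
    by_cases hc : c = '\\'
    · simpa [pvSkipBS, pvSegs, hc] using ih
    · simp [pvSkipBS, pvTakeSeg, pvSegs, hc]

lemma segs_drop_skip (l : List Char) : pvSegs (pvDropSeg (pvSkipBS l)) = (pvSegs l).tail := by
  induction l with
  | nil => simp [pvSkipBS, pvDropSeg, pvSegs]
  | cons c cs ih =>
    by_cases hc : c = '\\'
    · simpa [pvSkipBS, pvSegs, hc] using ih
    · simp [pvSkipBS, pvDropSeg, pvSegs, hc]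

lemma nextSeg_fst (l : List Char) : (pvNextSeg l).1 = String.ofList ((pvSegs l).headD []) := by
  simp [pvNextSeg, takeSeg_skip]

lemma segs_nextSeg_snd (l : List Char) : pvSegs ((pvNextSeg l).2) = (pvSegs l).tail := by
  simp [pvNextSeg, segs_drop_skip]

-- ===== VERDICT (by name: the statement is the Claim_ definition above) =====
theorem convert_wsl_unc_to_drive_py_spec : Claim_equal_convert_wsl_unc_to_drive_py := by
  intro fp _
  unfold Spec_convert_wsl_unc_to_drive_py
  simp only [convert_wsl_unc_to_drive_py, convert_wsl_unc_to_drive_py_alt]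
  by_cases hp : PySem.Str.startswith (PySem.Str.lower (PySem.Str.replace fp "\\\\" "\\")) "\\wsl.localhost\\"
  case neg => rw [if_pos hp, if_pos hp]
  case pos =>
    rw [if_neg (not_not_intro hp), if_neg (not_not_intro hp)]
    simp only [parts_eq]
    simp only [String.toList_ofList, nextSeg_fst, segs_nextSeg_snd]
    generalize pvSegs (PySem.Str.replace fp "\\\\" "\\").toList = P
    rcases P with _ | ⟨a, _ | ⟨b, _ | ⟨c, _ | ⟨d, rest⟩⟩⟩⟩ <;>
      simp only [List.headD_cons, List.headD_nil, List.tail_cons, List.tail_nil]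
    · rw [if_pos (by simp), if_pos (by decide)]
    · rw [if_pos (by simp)]
      by_cases h1 : PySem.Str.lower (String.ofList a) ≠ "wsl.localhost"
      · rw [if_pos h1]
      · rw [if_neg h1, if_pos (by decide)]
    · rw [if_pos (by simp)]
      by_cases h1 : PySem.Str.lower (String.ofList a) ≠ "wsl.localhost"
      · rw [if_pos h1]
      · rw [if_neg h1, if_pos (by decide)]
    · rw [if_pos (by simp)]
      by_cases h1 : PySem.Str.lower (String.ofList a) ≠ "wsl.localhost"
      · rw [if_pos h1]
      · rw [if_neg h1]
        by_cases h2 : PySem.Str.lower (String.ofList c) ≠ "mnt"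
        · rw [if_pos h2]
        · rw [if_neg h2, if_pos (by decide)]
    · rw [if_neg (by simp)]
      rw [show PySem.List.pyGetD (List.map String.ofList (a::b::c::d::rest)) 0 "" = String.ofList a from by
        simp [PySem.List.pyGetD_zero_cons]]
      rw [show PySem.List.pyGetD (List.map String.ofList (a::b::c::d::rest)) 2 "" = String.ofList c from by
        simp [PySem.List.pyGetD_ofNat']]
      rw [show PySem.List.pyGetD (List.map String.ofList (a::b::c::d::rest)) 3 "" = String.ofList d from by
        simp [PySem.List.pyGetD_ofNat']]
      rw [show PySem.List.slice (List.map String.ofList (a::b::c::d::rest)) (some 4) none = List.map String.ofList rest from by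
        simp [PySem.List.slice, PySem.List.clampIdx]]
      by_cases h1 : PySem.Str.lower (String.ofList a) ≠ "wsl.localhost"
      · rw [if_pos h1, if_pos h1]
      · rw [if_neg h1, if_neg h1]
        by_cases h2 : PySem.Str.lower (String.ofList c) ≠ "mnt"
        · rw [if_pos h2, if_pos h2]
        · rw [if_neg h2, if_neg h2]
          by_cases h3 : PySem.Str.len (String.ofList d) ≠ 1 ∨ ¬ PySem.Str.strIsalpha (String.ofList d)
          · rw [if_pos h3, if_pos h3]
          · rw [if_neg h3, if_neg h3]
            by_cases hr : PySem.Str.join "\\" (List.map String.ofList rest) ≠ ""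
            · rw [if_pos hr]
            · rw [if_neg hr]
              push_neg at hr
              rw [hr]
              simp
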